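-- pv_equiv track=rewrite | github.com/glowisn/algorithm | 백준/Silver/1713. 후보 추천하기/후보 추천하기.py | solution
-- ===== SOURCE A (Python) =====
-- def solution(frame_count,recos):
--     frames = []
--     levels = []
--     for reco in recos:
--         if reco in frames:
--             for i in range(len(frames)):
--                 if frames[i] == reco:
--                     levels[i] += 1
--         else:
--             if len(frames) >= frame_count:
--                 min_l = min(levels)
--                 for j in range(frame_count):
--                     if min_l == levels[j]:
--                         frames.pop(j)
--                         levels.pop(j)
--                         break
--                 frames.append(reco)
--                 levels.append(1)
--             else:
--                 frames.append(reco)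
--                 levels.append(1)
--     return frames
-- ===== SOURCE B (Python) =====
-- def _ins(order, e):
--     # insert e into the ascending-sorted list at its position
--     i = 0
--     while i < len(order) and order[i] < e:
--         i += 1
--     order.insert(i, e)
--
--
-- def solution(frame_count, recos):
--     # priority-sorted list of (level, time, cand); order[0] is always the eviction victim
--     order = []
--     t = 0
--     for r in recos:
--         for i in range(len(order)):
--             if order[i][2] == r:
--                 lvl, tm, _ = order.pop(i)
--                 _ins(order, (lvl + 1, tm, r))
--                 break
--         else:
--             if len(order) >= frame_count:
--                 order.pop(0)
--             _ins(order, (1, t, r))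
--             t += 1
--     return [c for _, _, c in sorted(order, key=lambda e: e[1])]
-- ===== Notes on version B (the rewrite author's own statement) =====
-- stated objective: alternative
-- what changed: A keeps frames and levels as two insertion-ordered parallel lists and scans for the minimum level at every eviction; B keeps one list of (level, time, cand) triples maintained in sorted priority order, so the eviction victim is always the head, and recovers the frame order at the end by sorting the survivors by insertion time.
import Mathlib
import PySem

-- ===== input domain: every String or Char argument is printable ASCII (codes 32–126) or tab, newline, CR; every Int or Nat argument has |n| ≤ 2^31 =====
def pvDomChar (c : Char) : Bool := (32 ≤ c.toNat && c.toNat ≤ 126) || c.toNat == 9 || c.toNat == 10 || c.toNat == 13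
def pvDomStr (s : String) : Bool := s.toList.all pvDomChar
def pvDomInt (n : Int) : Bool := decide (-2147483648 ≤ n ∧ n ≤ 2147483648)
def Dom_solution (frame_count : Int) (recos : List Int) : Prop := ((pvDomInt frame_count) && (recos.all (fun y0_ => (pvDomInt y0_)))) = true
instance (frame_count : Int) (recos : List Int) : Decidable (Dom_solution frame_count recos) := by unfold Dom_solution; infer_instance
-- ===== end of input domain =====

-- B replaces A's insertion-ordered parallel lists (frames/levels, min-scan eviction)
-- by one priority-sorted list of (level, time, cand) triples whose head is always
-- the eviction victim, sorting the survivors by insertion time at the end.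

-- ===== PORT A =====
-- 'for i in range(len(frames)): if frames[i] == reco: levels[i] += 1'
def bumpA (frames levels : List Int) (reco : Int) : List Int :=
  match frames, levels with
  | f :: fs, l :: ls => (if f == reco then l + 1 else l) :: bumpA fs ls reco
  | _, ls => ls

-- 'for j in range(frame_count): if min_l == levels[j]: frames.pop(j); levels.pop(j); break'
-- (at this point len(frames) = len(levels) = frame_count, so scanning the whole lists is exact)
def evictA (frames levels : List Int) (m : Int) : List Int × List Int :=
  match frames, levels with
  | f :: fs, l :: ls =>
    if m == l then (fs, ls)
    else
      let r := evictA fs ls m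
      (f :: r.1, l :: r.2)
  | fs, ls => (fs, ls)

def stepA (fc : Int) (st : List Int × List Int) (reco : Int) : List Int × List Int :=
  if st.1.contains reco then (st.1, bumpA st.1 st.2 reco)
  else if (st.1.length : Int) ≥ fc then
    match PySem.List.min? st.2 (fun x => x) with
    | some m =>
      let r := evictA st.1 st.2 m
      (r.1 ++ [reco], r.2 ++ [1])
    | none => (st.1 ++ [reco], st.2 ++ [1])  -- min([]) raises ValueError in Python; outside Pre_
  else (st.1 ++ [reco], st.2 ++ [1])

def solution (frame_count : Int) (recos : List Int) : List Int :=
  (recos.foldl (stepA frame_count) ([], [])).1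

-- ===== PORT B =====
-- Python tuple comparison '<' on (level, time, cand), lexicographic
def ltT (a b : Int × Int × Int) : Bool :=
  decide (a.1 < b.1 ∨ (a.1 = b.1 ∧ (a.2.1 < b.2.1 ∨ (a.2.1 = b.2.1 ∧ a.2.2 < b.2.2))))

-- '_ins': walk past the elements < e, insert e there
def insB (e : Int × Int × Int) : List (Int × Int × Int) → List (Int × Int × Int)
  | [] => [e]
  | x :: xs => if ltT x e then x :: insB e xs else e :: x :: xs

-- 'for i in range(len(order)): if order[i][2] == r: order.pop(i); break / else:'
def findPop (r : Int) : List (Int × Int × Int) → Option ((Int × Int × Int) × List (Int × Int × Int))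
  | [] => none
  | x :: xs =>
    if x.2.2 == r then some (x, xs)
    else
      match findPop r xs with
      | some (e, rest) => some (e, x :: rest)
      | none => none

def stepB (fc : Int) (st : List (Int × Int × Int) × Int) (r : Int) : List (Int × Int × Int) × Int :=
  match findPop r st.1 with
  | some (e, rest) => (insB (e.1 + 1, e.2.1, r) rest, st.2)
  | none =>
    -- 'order.pop(0)' raises IndexError on an empty list in Python; outside Pre_
    let ord := if (st.1.length : Int) ≥ fc then st.1.drop 1 else st.1
    (insB (1, st.2, r) ord, st.2 + 1)

def solution_alt (frame_count : Int) (recos : List Int) : List Int :=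
  (PySem.List.sorted (recos.foldl (stepB frame_count) ([], 0)).1 (fun e => e.2.1) false).map
    (fun e => e.2.2)

-- ===== PRECONDITION & SPEC =====
-- Pre_ excludes exactly the inputs on which Python A raises ValueError (min() of an
-- empty list: frame_count ≤ 0 with a nonempty recos); Python B raises there too (IndexError).
def Pre_solution (frame_count : Int) (recos : List Int) : Prop :=
  recos = [] ∨ 1 ≤ frame_count
instance (frame_count : Int) (recos : List Int) : Decidable (Pre_solution frame_count recos) := by
  unfold Pre_solution; infer_instance

def pvWitness_solution : Int × List Int := (2, [1, 2, 3, 1, 2, 4])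

def Spec_solution (frame_count : Int) (recos : List Int) (out : List Int) : Prop := out = solution_alt frame_count recos
instance (frame_count : Int) (recos : List Int) (out : List Int) : Decidable (Spec_solution frame_count recos out) := by unfold Spec_solution; infer_instance

-- ===== CLAIM (what is proved, stated in full; the proofs are below) =====
def Claim_equal_solution : Prop := ∀ (frame_count : Int) (recos : List Int), Dom_solution frame_count recos → Pre_solution frame_count recos → Spec_solution frame_count recos (solution frame_count recos)

-- ===== LEMMAS AND PROOFS =====

-- ghost state: entries (level, time, cand) in frame (insertion) order, plus the time counter
def bumpE (r : Int) (e : Int × Int × Int) : Int × Int × Int :=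
  if e.2.2 == r then (e.1 + 1, e.2.1, e.2.2) else e

-- remove the first entry whose level equals m
def evictE (m : Int) : List (Int × Int × Int) → List (Int × Int × Int)
  | [] => []
  | e :: es => if m == e.1 then es else e :: evictE m es

def stepE (fc : Int) (st : List (Int × Int × Int) × Int) (r : Int) : List (Int × Int × Int) × Int :=
  if (st.1.map (fun e => e.2.2)).contains r then (st.1.map (bumpE r), st.2)
  else if (st.1.length : Int) ≥ fc then
    match PySem.List.min? (st.1.map (fun e => e.1)) (fun x => x) with
    | some m => (evictE m st.1 ++ [(1, st.2, r)], st.2 + 1)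
    | none => (st.1 ++ [(1, st.2, r)], st.2 + 1)
  else (st.1 ++ [(1, st.2, r)], st.2 + 1)

-- ---------- A-side bridge: stepA is stepE seen through the two projections ----------

lemma bump_bridge (ents : List (Int × Int × Int)) (r : Int) :
    bumpA (ents.map (fun e => e.2.2)) (ents.map (fun e => e.1)) r
      = (ents.map (bumpE r)).map (fun e => e.1) := by
  induction ents with
  | nil => rfl
  | cons e es ih =>
    simp only [List.map, bumpA, ih, bumpE]
    by_cases h : e.2.2 = r <;> simp [h]

lemma bumpE_cand (r : Int) (e : Int × Int × Int) : (bumpE r e).2.2 = e.2.2 := by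
  unfold bumpE; split <;> rfl

lemma bumpE_time (r : Int) (e : Int × Int × Int) : (bumpE r e).2.1 = e.2.1 := by
  unfold bumpE; split <;> rfl

lemma evict_bridge (ents : List (Int × Int × Int)) (m : Int) :
    evictA (ents.map (fun e => e.2.2)) (ents.map (fun e => e.1)) m
      = ((evictE m ents).map (fun e => e.2.2), (evictE m ents).map (fun e => e.1)) := by
  induction ents with
  | nil => rfl
  | cons e es ih =>
    simp only [List.map, evictA, evictE]
    by_cases h : m = e.1 <;> simp [h, ih]

lemma stepA_bridge (fc : Int) (ents : List (Int × Int × Int)) (t : Int) (r : Int) :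
    stepA fc (ents.map (fun e => e.2.2), ents.map (fun e => e.1)) r
      = ((stepE fc (ents, t) r).1.map (fun e => e.2.2),
         (stepE fc (ents, t) r).1.map (fun e => e.1)) := by
  simp only [stepA, stepE, List.length_map]
  by_cases hc : (List.map (fun e => e.2.2) ents).contains r
  · simp only [hc, if_true, Prod.mk.injEq]
    refine ⟨?_, bump_bridge ents r⟩
    rw [List.map_map]
    exact (List.map_congr_left (fun e _ => bumpE_cand r e)).symm
  · simp only [hc, Bool.false_eq_true, if_false]
    by_cases hsz : (ents.length : Int) ≥ fc
    · simp only [hsz, if_true]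
      cases hm : PySem.List.min? (List.map (fun e => e.1) ents) (fun x => x) with
      | none => dsimp only; simp [List.map_append]
      | some m =>
        dsimp only
        rw [evict_bridge]
        simp [List.map_append]
    · simp [hsz, List.map_append]

lemma foldA_bridge (fc : Int) (recos : List Int) (ents : List (Int × Int × Int)) (t : Int) :
    recos.foldl (stepA fc) (ents.map (fun e => e.2.2), ents.map (fun e => e.1))
      = ((recos.foldl (stepE fc) (ents, t)).1.map (fun e => e.2.2),
         (recos.foldl (stepE fc) (ents, t)).1.map (fun e => e.1)) := by
  induction recos generalizing ents t with
  | nil => rfl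
  | cons r rs ih =>
    simp only [List.foldl]
    rw [stepA_bridge fc ents t r]
    rw [ih (stepE fc (ents, t) r).1 (stepE fc (ents, t) r).2]

-- ---------- order facts about the lexicographic comparison ----------

lemma ltT_asymm {a b : Int × Int × Int} (h1 : ltT a b = true) (h2 : ltT b a = true) : False := by
  simp only [ltT, decide_eq_true_eq] at h1 h2; omega

lemma ltT_trans {a b c : Int × Int × Int} (h1 : ltT a b = true) (h2 : ltT b c = true) :
    ltT a c = true := by
  simp only [ltT, decide_eq_true_eq] at *; omega

lemma ltT_of_not_lt_of_ne_time {x e : Int × Int × Int} (h : ¬ ltT x e = true)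
    (ht : x.2.1 ≠ e.2.1) : ltT e x = true := by
  simp only [ltT, decide_eq_true_eq] at *; omega

lemma ltT_of_level_lt {x y : Int × Int × Int} (h : x.1 < y.1) : ltT x y = true := by
  simp only [ltT, decide_eq_true_eq]; omega

lemma ltT_of_level_eq_time_lt {x y : Int × Int × Int} (h : x.1 = y.1) (ht : x.2.1 < y.2.1) :
    ltT x y = true := by
  simp only [ltT, decide_eq_true_eq]; omega

-- ---------- insB ----------

lemma insB_perm (e : Int × Int × Int) (l : List (Int × Int × Int)) :
    (insB e l).Perm (e :: l) := by
  induction l with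
  | nil => simp [insB]
  | cons x xs ih =>
    simp only [insB]
    split
    · exact ((ih.cons x).trans (List.Perm.swap e x xs))
    · exact List.Perm.refl _

lemma insB_pairwise (e : Int × Int × Int) (l : List (Int × Int × Int))
    (hp : l.Pairwise (fun a b => ltT a b = true))
    (ht : ∀ x ∈ l, x.2.1 ≠ e.2.1) :
    (insB e l).Pairwise (fun a b => ltT a b = true) := by
  induction l with
  | nil => simp [insB]
  | cons x xs ih =>
    rcases List.pairwise_cons.mp hp with ⟨hx, hxs⟩
    simp only [insB]
    split
    · rename_i hlt
      refine List.pairwise_cons.mpr ⟨?_, ih hxs (fun y hy => ht y (by simp [hy]))⟩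
      intro y hy
      rcases List.mem_cons.mp ((insB_perm e xs).mem_iff.mp hy) with h | h
      · exact h ▸ hlt
      · exact hx y h
    · rename_i hnlt
      have he : ltT e x = true := ltT_of_not_lt_of_ne_time hnlt (ht x (by simp))
      refine List.pairwise_cons.mpr ⟨?_, hp⟩
      intro y hy
      rcases List.mem_cons.mp hy with h | h
      · exact h ▸ he
      · exact ltT_trans he (hx y h)

-- ---------- findPop ----------

lemma findPop_none_spec (r : Int) (l : List (Int × Int × Int)) (h : findPop r l = none) :
    ∀ x ∈ l, x.2.2 ≠ r := by
  induction l with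
  | nil => simp
  | cons x xs ih =>
    intro y hy
    simp only [findPop] at h
    by_cases hx : x.2.2 = r
    · simp [hx] at h
    · simp only [show (x.2.2 == r) = false by simpa using hx, Bool.false_eq_true, if_false] at h
      rcases List.mem_cons.mp hy with h' | h'
      · exact h' ▸ hx
      · cases hfp : findPop r xs with
        | none => exact ih hfp y h'
        | some p => rw [hfp] at h; cases p; simp at h

lemma findPop_some_spec (r : Int) (l : List (Int × Int × Int))
    (e : Int × Int × Int) (rest : List (Int × Int × Int))
    (h : findPop r l = some (e, rest)) :
    ∃ pre suf, l = pre ++ e :: suf ∧ rest = pre ++ suf ∧ e.2.2 = r := by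
  induction l generalizing rest with
  | nil => simp [findPop] at h
  | cons x xs ih =>
    simp only [findPop] at h
    by_cases hx : x.2.2 = r
    · simp only [show (x.2.2 == r) = true by simpa using hx, if_true, Option.some.injEq,
        Prod.mk.injEq] at h
      exact ⟨[], xs, by simp [← h.1], by simp [← h.2], h.1 ▸ hx⟩
    · simp only [show (x.2.2 == r) = false by simpa using hx, Bool.false_eq_true, if_false] at h
      cases hfp : findPop r xs with
      | none => rw [hfp] at h; simp at h
      | some p =>
        obtain ⟨e', rest'⟩ := p
        rw [hfp] at h
        simp only [Option.some.injEq, Prod.mk.injEq] at h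
        obtain ⟨pre, suf, h1, h2, h3⟩ := ih rest' (by rw [hfp, h.1])
        exact ⟨x :: pre, suf, by simp [h1], by simp [← h.2, h2], h3⟩

lemma findPop_isSome (r : Int) (l : List (Int × Int × Int))
    (h : ∃ x ∈ l, x.2.2 = r) : ∃ e rest, findPop r l = some (e, rest) := by
  cases hfp : findPop r l with
  | none =>
    obtain ⟨x, hx, hxr⟩ := h
    exact absurd hxr (findPop_none_spec r l hfp x hx)
  | some p =>
    obtain ⟨e, rest⟩ := p
    exact ⟨e, rest, rfl⟩

-- ---------- evictE ----------

lemma evictE_spec (m : Int) (l : List (Int × Int × Int)) (h : ∃ x ∈ l, x.1 = m) :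
    ∃ pre f suf, l = pre ++ f :: suf ∧ f.1 = m ∧ (∀ x ∈ pre, x.1 ≠ m) ∧
      evictE m l = pre ++ suf := by
  induction l with
  | nil => simp at h
  | cons x xs ih =>
    by_cases hx : x.1 = m
    · exact ⟨[], x, xs, by simp, hx, by simp, by simp [evictE, hx]⟩
    · obtain ⟨y, hy, hym⟩ := h
      rcases List.mem_cons.mp hy with h' | h'
      · exact absurd (h' ▸ hym) hx
      · obtain ⟨pre, f, suf, h1, h2, h3, h4⟩ := ih ⟨y, h', hym⟩
        refine ⟨x :: pre, f, suf, by simp [h1], h2, ?_, ?_⟩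
        · intro z hz
          rcases List.mem_cons.mp hz with h'' | h''
          · exact h'' ▸ hx
          · exact h3 z h''
        · simp only [evictE, show (m == x.1) = false by simpa using fun h => hx h.symm,
            Bool.false_eq_true, if_false, h4, List.cons_append]

-- ---------- the invariant between the ghost entries and B's sorted order ----------

def InvEB (ents : List (Int × Int × Int)) (t : Int) (order : List (Int × Int × Int)) : Prop :=
  order.Perm ents ∧ order.Pairwise (fun a b => ltT a b = true) ∧
  ents.Pairwise (fun a b => a.2.1 < b.2.1) ∧ (∀ e ∈ ents, e.2.1 < t) ∧
  (ents.map (fun e => e.2.2)).Nodup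

lemma times_nodup (ents : List (Int × Int × Int))
    (h : ents.Pairwise (fun a b => a.2.1 < b.2.1)) :
    (ents.map (fun e => e.2.1)).Nodup := by
  have h2 : ents.Pairwise (fun a b => a.2.1 ≠ b.2.1) := h.imp (fun hlt => by omega)
  simpa [List.Nodup] using List.pairwise_map.mpr h2

-- in a list whose f-image is Nodup, every element besides the distinguished one differs under f
lemma nodup_split (f : (Int × Int × Int) → Int) (pre suf : List (Int × Int × Int))
    (e : Int × Int × Int) (hnd : ((pre ++ e :: suf).map f).Nodup) :
    ∀ x ∈ pre ++ suf, f x ≠ f e := by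
  intro x hx
  rcases List.mem_append.mp hx with h | h
  · have h1 := (List.nodup_append.mp (by simpa [List.map_append] using hnd)).2.2
    exact h1 (f x) (List.mem_map_of_mem h) (f e) (by simp)
  · have h1 := (List.nodup_append.mp (by simpa [List.map_append] using hnd)).2.1
    have h2 := (List.nodup_cons.mp h1).1
    intro heq
    exact h2 (heq ▸ List.mem_map_of_mem h)

lemma map_bumpE_id (r : Int) (l : List (Int × Int × Int)) (h : ∀ x ∈ l, x.2.2 ≠ r) :
    l.map (bumpE r) = l := by
  induction l with
  | nil => rfl
  | cons x xs ih =>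
    have hx := h x (by simp)
    simp only [List.map, bumpE, show (x.2.2 == r) = false by simpa using hx,
      Bool.false_eq_true, if_false, List.cons.injEq]
    exact ⟨by trivial, ih (fun y hy => h y (by simp [hy]))⟩

lemma stepEB (fc : Int) (ents : List (Int × Int × Int)) (t : Int)
    (order : List (Int × Int × Int)) (r : Int) (hfc : 1 ≤ fc) (h : InvEB ents t order) :
    InvEB (stepE fc (ents, t) r).1 (stepE fc (ents, t) r).2 (stepB fc (order, t) r).1 ∧
      (stepB fc (order, t) r).2 = (stepE fc (ents, t) r).2 := by
  obtain ⟨hperm, hord, htp, htlt, hnd⟩ := h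
  have hndO : (order.map (fun e => e.2.2)).Nodup := ((hperm.map _).nodup_iff).mpr hnd
  have htndO : (order.map (fun e => e.2.1)).Nodup :=
    ((hperm.map _).nodup_iff).mpr (times_nodup ents htp)
  by_cases hc : ∃ x ∈ ents, x.2.2 = r
  · -- r already has an entry: bump its level
    have hcont : (ents.map (fun e => e.2.2)).contains r = true := by
      obtain ⟨x, hx, hxr⟩ := hc
      have hmem : r ∈ ents.map (fun e => e.2.2) := by
        rw [List.mem_map]
        exact ⟨x, hx, hxr⟩
      simpa using hmem
    have hcO : ∃ x ∈ order, x.2.2 = r := by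
      obtain ⟨x, hx, hxr⟩ := hc
      refine ⟨x, ?_, hxr⟩
      exact hperm.mem_iff.mpr hx
    obtain ⟨e, rest, hfp⟩ := findPop_isSome r order hcO
    obtain ⟨pre, suf, hdec, hrest, her⟩ := findPop_some_spec r order e rest hfp
    have hrc : ∀ x ∈ rest, x.2.2 ≠ r :=
      fun x hx => her ▸ nodup_split _ pre suf e (hdec ▸ hndO) x (hrest ▸ hx)
    have hrt : ∀ x ∈ rest, x.2.1 ≠ e.2.1 :=
      fun x hx => nodup_split _ pre suf e (hdec ▸ htndO) x (hrest ▸ hx)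
    have hrp : rest.Pairwise (fun a b => ltT a b = true) := by
      rw [hrest]
      exact List.Pairwise.sublist ((List.Sublist.refl pre).append (List.sublist_cons_self e suf))
        (hdec ▸ hord)
    have hbe : bumpE r e = (e.1 + 1, e.2.1, r) := by
      simp [bumpE, her]
    have hmapO : order.map (bumpE r) = pre ++ (e.1 + 1, e.2.1, r) :: suf := by
      have hp1 : ∀ x ∈ pre, x.2.2 ≠ r :=
        fun x hx => hrc x (hrest ▸ List.mem_append_left suf hx)
      have hp2 : ∀ x ∈ suf, x.2.2 ≠ r :=
        fun x hx => hrc x (hrest ▸ List.mem_append_right pre hx)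
      rw [hdec, List.map_append, List.map_cons, hbe, map_bumpE_id r pre hp1,
        map_bumpE_id r suf hp2]
    have hperm' : (insB (e.1 + 1, e.2.1, r) rest).Perm (ents.map (bumpE r)) := by
      refine (insB_perm _ _).trans ?_
      refine (List.Perm.trans ?_ (hperm.map (bumpE r)))
      rw [hmapO, hrest]
      exact List.perm_middle.symm
    simp only [stepE, stepB, hcont, if_true, hfp]
    refine ⟨⟨hperm', insB_pairwise _ _ hrp hrt, ?_, ?_, ?_⟩, by trivial⟩
    · exact List.pairwise_map.mpr (htp.imp (fun {a b} hab => by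
        simpa [bumpE_time] using hab))
    · intro x hx
      obtain ⟨y, hy, hxy⟩ := List.mem_map.mp hx
      rw [← hxy, bumpE_time]
      exact htlt y hy
    · rw [List.map_map]
      have : ((fun e => e.2.2) ∘ bumpE r) = (fun e : Int × Int × Int => e.2.2) := by
        funext x; exact bumpE_cand r x
      rw [this]
      exact hnd
  · -- r is new
    have hcont : (ents.map (fun e => e.2.2)).contains r = false := by
      rw [Bool.eq_false_iff]
      intro hx
      apply hc
      have hex : ∃ a b, ((a, b, r) : Int × Int × Int) ∈ ents := by simpa using hx
      obtain ⟨a, b, hab⟩ := hex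
      exact ⟨(a, b, r), hab, rfl⟩
    have hfp : findPop r order = none := by
      cases hfpo : findPop r order with
      | none => rfl
      | some p =>
        obtain ⟨pre, suf, hdec, _, her⟩ := findPop_some_spec r order p.1 p.2 (by rw [hfpo])
        exact absurd ⟨p.1, hperm.mem_iff.mp (hdec ▸ (by simp)), her⟩ hc
    have hlen : order.length = ents.length := hperm.length_eq
    have hfresh : ∀ l' : List (Int × Int × Int), l'.Perm ents → ∀ x ∈ l', x.2.1 ≠ t :=
      fun l' hp x hx => by have := htlt x (hp.mem_iff.mp hx); omega
    simp only [stepE, stepB, hcont, Bool.false_eq_true, if_false, hfp, hlen]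
    by_cases hsz : (ents.length : Int) ≥ fc
    · -- eviction: B pops the head of the sorted order, A removes the first min-level entry
      simp only [hsz, if_true]
      have hne : ents ≠ [] := by
        intro hnil; rw [hnil] at hsz; simp at hsz; omega
      cases hm : PySem.List.min? (List.map (fun e => e.1) ents) (fun x => x) with
      | none =>
        exact absurd (List.map_eq_nil_iff.mp (PySem.List.min?_eq_none_iff _ _ |>.mp hm)) hne
      | some m =>
        obtain ⟨f0, hf0, hf0m⟩ := List.mem_map.mp (PySem.List.min?_mem hm)
        have hmin : ∀ x ∈ ents, m ≤ x.1 := fun x hx =>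
          PySem.List.min?_isMin hm x.1 (List.mem_map_of_mem hx)
        obtain ⟨pre, f, suf, hdec, hfm, hprem, hev⟩ := evictE_spec m ents ⟨f0, hf0, hf0m⟩
        -- f is the strict lexicographic minimum of the remaining entries
        have hflex : ∀ x ∈ pre ++ suf, ltT f x = true := by
          intro x hx
          rcases List.mem_append.mp hx with h | h
          · have h1 := hprem x h
            have h2 := hmin x (hdec ▸ List.mem_append_left _ h)
            exact ltT_of_level_lt (by omega)
          · have h2 := hmin x (hdec ▸ List.mem_append_right _ (List.mem_cons_of_mem f h))
            by_cases hl : f.1 < x.1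
            · exact ltT_of_level_lt hl
            · have htx : f.2.1 < x.2.1 := by
                have := (List.pairwise_append.mp (hdec ▸ htp)).2.1
                exact (List.pairwise_cons.mp this).1 x h
              exact ltT_of_level_eq_time_lt (by omega) htx
        -- order is nonempty; its head is exactly f
        cases horder : order with
        | nil => rw [horder] at hlen; rw [← hlen] at hsz; simp at hsz; omega
        | cons h0 tl =>
          have hh0min : ∀ x ∈ tl, ltT h0 x = true := (List.pairwise_cons.mp (horder ▸ hord)).1
          have hpermd : (h0 :: tl).Perm (f :: (pre ++ suf)) :=
            (horder ▸ hperm).trans (hdec ▸ List.perm_middle)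
          have hh0f : h0 = f := by
            by_contra hne'
            have hfmem : f ∈ h0 :: tl := hpermd.mem_iff.mpr (by simp)
            have hftl : f ∈ tl := by
              rcases List.mem_cons.mp hfmem with h | h
              · exact absurd h.symm hne'
              · exact h
            have h0mem : h0 ∈ f :: (pre ++ suf) := hpermd.mem_iff.mp (by simp)
            have h0ps : h0 ∈ pre ++ suf := by
              rcases List.mem_cons.mp h0mem with h | h
              · exact absurd h hne'
              · exact h
            exact ltT_asymm (hh0min f hftl) (hflex h0 h0ps)
          have htlperm : tl.Perm (pre ++ suf) := (hh0f ▸ hpermd).cons_inv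
          have htlp : tl.Pairwise (fun a b => ltT a b = true) :=
            (List.pairwise_cons.mp (horder ▸ hord)).2
          -- (pre ++ suf) as a sublist of ents
          have hpssub : (pre ++ suf).Sublist ents := by
            rw [hdec]
            exact (List.Sublist.refl pre).append (List.sublist_cons_self f suf)
          simp only [List.drop_one, List.tail_cons, hev]
          refine ⟨⟨?_, ?_, ?_, ?_, ?_⟩, by trivial⟩
          · refine (insB_perm _ _).trans ?_
            refine (List.Perm.cons _ htlperm).trans ?_
            simpa using
              (List.perm_middle (a := ((1 : Int), t, r)) (l₁ := pre ++ suf)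
                (l₂ := ([] : List (Int × Int × Int)))).symm
          · refine insB_pairwise _ _ htlp ?_
            intro x hx
            have hxe : x ∈ ents := hpssub.mem (htlperm.mem_iff.mp hx)
            have := htlt x hxe
            show x.2.1 ≠ t
            omega
          · rw [List.pairwise_append]
            refine ⟨htp.sublist hpssub, List.pairwise_singleton _ _, ?_⟩
            intro a ha b hb
            simp only [List.mem_singleton] at hb
            subst hb
            exact htlt a (hpssub.mem ha)
          · intro x hx
            rcases List.mem_append.mp hx with h | h
            · have := htlt x (hpssub.mem h)
              omega
            · simp only [List.mem_singleton] at h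
              subst h
              show t < t + 1
              omega
          · rw [List.map_append, List.nodup_append]
            refine ⟨(hpssub.map _).nodup hnd, by simp, ?_⟩
            intro a ha b hb
            simp only [List.map_cons, List.map_nil, List.mem_singleton] at hb
            subst hb
            obtain ⟨y, hy, hya⟩ := List.mem_map.mp ha
            intro heq
            exact hc ⟨y, hpssub.mem hy, by rw [hya, heq]⟩
    · -- room left: both append
      simp only [hsz, if_false]
      refine ⟨⟨?_, ?_, ?_, ?_, ?_⟩, by trivial⟩
      · refine (insB_perm _ _).trans ?_
        refine (List.Perm.cons _ hperm).trans ?_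
        simpa using
          (List.perm_middle (a := ((1 : Int), t, r)) (l₁ := ents)
            (l₂ := ([] : List (Int × Int × Int)))).symm
      · exact insB_pairwise _ _ hord (fun x hx => hfresh order hperm x hx)
      · rw [List.pairwise_append]
        refine ⟨htp, List.pairwise_singleton _ _, ?_⟩
        intro a ha b hb
        simp only [List.mem_singleton] at hb
        subst hb
        exact htlt a ha
      · intro x hx
        rcases List.mem_append.mp hx with h | h
        · have := htlt x h
          omega
        · simp only [List.mem_singleton] at h
          subst h
          show t < t + 1
          omega
      · rw [List.map_append, List.nodup_append]
        refine ⟨hnd, by simp, ?_⟩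
        intro a ha b hb
        simp only [List.map_cons, List.map_nil, List.mem_singleton] at hb
        subst hb
        obtain ⟨y, hy, hya⟩ := List.mem_map.mp ha
        intro heq
        exact hc ⟨y, hy, by rw [hya, heq]⟩

lemma foldEB (fc : Int) (recos : List Int) (ents : List (Int × Int × Int)) (t : Int)
    (order : List (Int × Int × Int)) (hfc : 1 ≤ fc) (h : InvEB ents t order) :
    InvEB (recos.foldl (stepE fc) (ents, t)).1 (recos.foldl (stepE fc) (ents, t)).2
      ((recos.foldl (stepB fc) (order, t)).1) := by
  induction recos generalizing ents t order with
  | nil => exact h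
  | cons r rs ih =>
    simp only [List.foldl]
    obtain ⟨h1, h2⟩ := stepEB fc ents t order r hfc h
    have : stepB fc (order, t) r = ((stepB fc (order, t) r).1, (stepE fc (ents, t) r).2) := by
      rw [← h2]
    rw [this]
    have hs : stepE fc (ents, t) r = ((stepE fc (ents, t) r).1, (stepE fc (ents, t) r).2) := rfl
    rw [hs]
    exact ih _ _ _ h1

-- ===== VERDICT (by name: the statement is the Claim_ definition above) =====
theorem solution_spec : Claim_equal_solution := by
  unfold Claim_equal_solution
  intro fc recos _ hpre
  unfold Spec_solution solution solution_alt
  rcases hpre with h | hfc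
  · subst h; rfl
  · have h0 : InvEB [] 0 [] := ⟨List.Perm.refl _, List.Pairwise.nil, List.Pairwise.nil, by simp, by simp⟩
    obtain ⟨hperm, _, htimes, _, _⟩ := foldEB fc recos [] 0 [] hfc h0
    have hb := foldA_bridge fc recos [] 0
    simp only [List.map] at hb
    rw [hb]
    have hso := PySem.List.sorted_eq_of_perm_of_pairwise_lt _ _ (fun e => e.2.1) hperm.symm htimes
    simp [hso]
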